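-- pv_equiv track=rewrite | github.com/labgem/CAESAR | src/filter.py | tara_filter
-- ===== SOURCE A (Python) =====
-- def tara_filter(sequences, pattern):
--     """Filters TARA sequences, removes non-complete gene
--
--     Args:
--         sequences (str): all sequences
--         pattern (): selection pattern
--
--     Returns:
--         ids_checked (list): ids selected
--         fasta (str): sequences selected
--     """
--
--     seq_id = ""
--     ids_checked = []
--     fasta = ""
--
--
--     for line in sequences.split("\n"):
--         if line.startswith(">"):
--             if pattern in line:
--                 seq_id = line[1:].split()[0]
--                 ids_checked.append(seq_id)
--                 fasta += line + "\n"
--             else: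
--                 seq_id = ""
--
--         elif seq_id != "":
--             fasta += line + "\n"
--
--     return ids_checked, fasta
-- ===== SOURCE B (Python) =====
-- def tara_filter(sequences, pattern):
--     """Filters TARA sequences, removes non-complete gene (block-wise rewrite)."""
--     lines = sequences.split("\n")
--     n = len(lines)
--     ids_checked = []
--     kept = []
--     i = 0
--     while i < n:
--         line = lines[i]
--         if line.startswith(">") and pattern in line:
--             ids_checked.append(line[1:].split()[0])
--             j = i + 1
--             while j < n and not lines[j].startswith(">"):
--                 j += 1
--             kept.extend(lines[i:j])
--             i = j
--         else:
--             i += 1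
--     return ids_checked, "".join(l + "\n" for l in kept)
-- ===== Notes on version B (the rewrite author's own statement) =====
-- stated objective: alternative
-- what changed: Replaces A's stateful per-line scan (seq_id flag deciding whether a sequence line is kept, fasta grown by string +=) with a block-wise scan: on a matching header an inner scan consumes the whole record body at once, non-matching lines are skipped with no state, and the fasta is a single join over the kept lines.
import Mathlib
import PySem

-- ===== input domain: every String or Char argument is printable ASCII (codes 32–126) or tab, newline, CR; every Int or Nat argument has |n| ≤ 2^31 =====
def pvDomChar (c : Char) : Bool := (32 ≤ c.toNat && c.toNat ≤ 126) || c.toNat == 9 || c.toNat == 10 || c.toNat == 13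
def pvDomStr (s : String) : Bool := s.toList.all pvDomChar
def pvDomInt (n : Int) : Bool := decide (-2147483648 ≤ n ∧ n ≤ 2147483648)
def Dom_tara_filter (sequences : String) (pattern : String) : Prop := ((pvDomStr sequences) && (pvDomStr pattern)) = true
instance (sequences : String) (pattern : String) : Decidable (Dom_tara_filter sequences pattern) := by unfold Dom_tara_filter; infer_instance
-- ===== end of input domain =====

-- B replaces A's stateful per-line scan with a block-wise scan (consume a whole record after a
-- matching header, join the kept lines once at the end); equal return values are proved on Pre_.

-- ===== PORT A =====
-- one step of A's for-loop; state = (seq_id, ids_checked, fasta), all on List Char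
def tfStepA (pat : List Char) (st : List Char × List (List Char) × List Char)
    (line : List Char) : List Char × List (List Char) × List Char :=
  let (sid, ids, fasta) := st
  if PySem.Chars.startswith line ['>'] then
    if PySem.Chars.isIn pat line then
      -- seq_id = line[1:].split()[0]; Pre_ guarantees the split is nonempty (else Python raises IndexError)
      let sid' := (PySem.Chars.split₀ (PySem.Chars.slice line (some 1) none)).headD []
      (sid', ids ++ [sid'], fasta ++ line ++ ['\n'])
    else ([], ids, fasta)
  else if sid ≠ [] then (sid, ids, fasta ++ line ++ ['\n'])
  else (sid, ids, fasta)

def tara_filter (sequences : String) (pattern : String) : List String × String :=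
  let r := (PySem.Chars.splitOn sequences.toList ['\n']).foldl (tfStepA pattern.toList) ([], [], [])
  (r.2.1.map String.ofList, String.ofList r.2.2)

-- ===== PORT B =====
-- outer scan over the lines: a matching header consumes its whole record (inner takeWhile/dropWhile
-- scan = the j-loop of Source B); returns (ids, kept lines)
def tfGo (pat : List Char) : List (List Char) → List (List Char) × List (List Char)
  | [] => ([], [])
  | l :: ls =>
    if PySem.Chars.startswith l ['>'] && PySem.Chars.isIn pat l then
      let body := ls.takeWhile (fun x => !PySem.Chars.startswith x ['>'])
      let rest := ls.dropWhile (fun x => !PySem.Chars.startswith x ['>'])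
      let r := tfGo pat rest
      ((PySem.Chars.split₀ (PySem.Chars.slice l (some 1) none)).headD [] :: r.1, l :: (body ++ r.2))
    else tfGo pat ls
termination_by ls => ls.length
decreasing_by
  · have := List.length_dropWhile_le (fun x => !PySem.Chars.startswith x ['>']) ls
    simpa using Nat.lt_succ_of_le this
  · simp

def tara_filter_alt (sequences : String) (pattern : String) : List String × String :=
  let r := tfGo pattern.toList (PySem.Chars.splitOn sequences.toList ['\n'])
  (r.1.map String.ofList,
   String.ofList (PySem.Chars.join [] (r.2.map (fun l => l ++ ['\n']))))

-- ===== PRECONDITION & SPEC =====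
-- Pre_ excludes exactly the inputs where A raises IndexError: a header line matching the pattern
-- whose text after '>' contains no non-whitespace word (line[1:].split()[0] fails); B raises there too.
def Pre_tara_filter (sequences : String) (pattern : String) : Prop :=
  ∀ line ∈ PySem.Chars.splitOn sequences.toList ['\n'],
    PySem.Chars.startswith line ['>'] = true → PySem.Chars.isIn pattern.toList line = true →
      PySem.Chars.split₀ (PySem.Chars.slice line (some 1) none) ≠ []
instance (sequences : String) (pattern : String) : Decidable (Pre_tara_filter sequences pattern) := by
  unfold Pre_tara_filter; infer_instance

def pvWitness_tara_filter : String × String := (">id1 x\nACGT\n>id2 y\nGGTT", "id")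

def Spec_tara_filter (sequences : String) (pattern : String) (out : List String × String) : Prop := out = tara_filter_alt sequences pattern
instance (sequences : String) (pattern : String) (out : List String × String) : Decidable (Spec_tara_filter sequences pattern out) := by unfold Spec_tara_filter; infer_instance

-- ===== CLAIM (what is proved, stated in full; the proofs are below) =====
def Claim_equal_tara_filter : Prop := ∀ (sequences : String) (pattern : String), Dom_tara_filter sequences pattern → Pre_tara_filter sequences pattern → Spec_tara_filter sequences pattern (tara_filter sequences pattern)

-- ===== LEMMAS AND PROOFS =====

-- the first element of a dropWhile result falsifies the predicate
theorem dropWhile_head_false {α : Type} (p : α → Bool) (l : List α) (x : α) (xs : List α)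
    (h : l.dropWhile p = x :: xs) : p x = false := by
  induction l with
  | nil => simp at h
  | cons a t ih =>
    simp only [List.dropWhile] at h
    by_cases hp : p a = true
    · exact ih (by simpa [hp] using h)
    · simp [hp] at h
      rcases h with ⟨rfl, rfl⟩
      simpa using hp

-- every word produced by split₀ is nonempty (invariant of split₀.go)
theorem split₀_go_ne_nil (s cur : List Char) (acc : List (List Char))
    (hacc : ∀ w ∈ acc, w ≠ []) :
    ∀ w ∈ PySem.Chars.split₀.go s cur acc, w ≠ [] := by
  induction s generalizing cur acc with
  | nil =>
    intro w hw
    by_cases hc : cur.isEmpty = true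
    · rw [PySem.Chars.split₀.go, if_pos hc] at hw
      exact hacc w (List.mem_reverse.mp hw)
    · rw [PySem.Chars.split₀.go, if_neg hc] at hw
      rcases List.mem_cons.mp (List.mem_reverse.mp hw) with h | h
      · subst h; intro hn
        simp only [List.isEmpty_iff] at hc
        exact hc (by simpa using congrArg List.reverse hn)
      · exact hacc w h
  | cons c rest ih =>
    intro w hw
    by_cases hs : PySem.Chars.isspace c = true
    · by_cases hc : cur.isEmpty = true
      · rw [PySem.Chars.split₀.go, if_pos hs, if_pos hc] at hw
        exact ih [] acc hacc w hw
      · rw [PySem.Chars.split₀.go, if_pos hs, if_neg hc] at hw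
        refine ih [] (cur.reverse :: acc) ?_ w hw
        intro v hv
        rcases List.mem_cons.mp hv with h | h
        · subst h; intro hn
          simp only [List.isEmpty_iff] at hc
          exact hc (by simpa using congrArg List.reverse hn)
        · exact hacc v h
    · rw [PySem.Chars.split₀.go, if_neg hs] at hw
      exact ih (c :: cur) acc hacc w hw

theorem mem_split₀_ne_nil (s : List Char) (w : List Char) (h : w ∈ PySem.Chars.split₀ s) : w ≠ [] :=
  split₀_go_ne_nil s [] [] (by simp) w h

-- the seq_id A stores for a matching header is a nonempty word (under Pre_'s condition on that line)
theorem tok_ne_nil (l : List Char)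
    (h : PySem.Chars.split₀ (PySem.Chars.slice l (some 1) none) ≠ []) :
    (PySem.Chars.split₀ (PySem.Chars.slice l (some 1) none)).headD [] ≠ [] := by
  intro hn
  apply h
  cases hs : PySem.Chars.split₀ (PySem.Chars.slice l (some 1) none) with
  | nil => rfl
  | cons w ws =>
    exfalso
    rw [hs] at hn
    exact mem_split₀_ne_nil _ w (by rw [hs]; exact List.mem_cons_self) (by simpa using hn)

-- A's loop over a block of non-header lines while seq_id ≠ "": it appends each of them to fasta
theorem foldA_body (pat : List Char) (body rest : List (List Char))
    (sid : List Char) (ids : List (List Char)) (fasta : List Char)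
    (hsid : sid ≠ [])
    (hbody : ∀ l ∈ body, PySem.Chars.startswith l ['>'] = false) :
    (body ++ rest).foldl (tfStepA pat) (sid, ids, fasta)
      = rest.foldl (tfStepA pat) (sid, ids, fasta ++ (body.map (fun l => l ++ ['\n'])).flatten) := by
  induction body generalizing fasta with
  | nil => simp
  | cons b bs ih =>
    have hb := hbody b (by simp)
    have : tfStepA pat (sid, ids, fasta) b = (sid, ids, fasta ++ b ++ ['\n']) := by
      simp [tfStepA, hb, hsid]
    simp only [List.cons_append, List.foldl_cons, this]
    rw [ih (fasta ++ b ++ ['\n']) (fun l hl => hbody l (List.mem_cons_of_mem _ hl))]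
    simp

-- when the next line is a header (or there is none), the stored seq_id does not matter
theorem foldA_sid_irrel (pat : List Char) (rest : List (List Char))
    (sid : List Char) (ids : List (List Char)) (fasta : List Char)
    (hrest : rest = [] ∨ ∃ l ls, rest = l :: ls ∧ PySem.Chars.startswith l ['>'] = true) :
    (rest.foldl (tfStepA pat) (sid, ids, fasta)).2
      = (rest.foldl (tfStepA pat) ([], ids, fasta)).2 := by
  rcases hrest with h | ⟨l, ls, rfl, hl⟩
  · simp [h]
  · simp only [List.foldl_cons]
    have : tfStepA pat (sid, ids, fasta) l = tfStepA pat ([], ids, fasta) l := by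
      simp [tfStepA, hl]
    rw [this]

-- main loop correspondence: A's fold from an out-of-record state equals B's block recursion
theorem foldA_eq_go (pat : List Char) : ∀ (n : ℕ) (lines : List (List Char)),
    lines.length ≤ n →
    (∀ line ∈ lines, PySem.Chars.startswith line ['>'] = true →
        PySem.Chars.isIn pat line = true →
        PySem.Chars.split₀ (PySem.Chars.slice line (some 1) none) ≠ []) →
    ∀ (ids : List (List Char)) (fasta : List Char),
    (lines.foldl (tfStepA pat) ([], ids, fasta)).2
      = (ids ++ (tfGo pat lines).1,
         fasta ++ ((tfGo pat lines).2.map (fun l => l ++ ['\n'])).flatten) := by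
  intro n
  induction n with
  | zero =>
    intro lines hlen _ ids fasta
    have : lines = [] := List.length_eq_zero_iff.mp (Nat.le_zero.mp hlen)
    simp [this, tfGo]
  | succ n ih =>
    intro lines hlen hpre ids fasta
    match lines with
    | [] => simp [tfGo]
    | l :: ls =>
      have hlen' : ls.length ≤ n := by simpa using hlen
      by_cases hhdr : PySem.Chars.startswith l ['>'] = true
      · by_cases hpat : PySem.Chars.isIn pat l = true
        · -- matching header: A enters the record, B consumes it as a block
          have htok : (PySem.Chars.split₀ (PySem.Chars.slice l (some 1) none)).headD [] ≠ [] :=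
            tok_ne_nil l (hpre l (by simp) hhdr hpat)
          set tok := (PySem.Chars.split₀ (PySem.Chars.slice l (some 1) none)).headD [] with htokdef
          have hstep : tfStepA pat ([], ids, fasta) l
              = (tok, ids ++ [tok], fasta ++ l ++ ['\n']) := by
            simp [tfStepA, hhdr, hpat, htokdef, List.headD_eq_head?_getD]
          set p : List Char → Bool := fun x => !PySem.Chars.startswith x ['>'] with hp
          have hsplit : ls = ls.takeWhile p ++ ls.dropWhile p := (List.takeWhile_append_dropWhile).symm
          have hbody : ∀ x ∈ ls.takeWhile p, PySem.Chars.startswith x ['>'] = false := by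
            intro x hx
            have := List.mem_takeWhile_imp hx
            simpa [hp] using this
          have hrest : ls.dropWhile p = [] ∨
              ∃ r rs, ls.dropWhile p = r :: rs ∧ PySem.Chars.startswith r ['>'] = true := by
            rcases hd : ls.dropWhile p with _ | ⟨r, rs⟩
            · exact Or.inl rfl
            · refine Or.inr ⟨r, rs, rfl, ?_⟩
              have := dropWhile_head_false p ls r rs hd
              simpa [hp] using this
          have hrlen : (ls.dropWhile p).length ≤ n :=
            le_trans (List.length_dropWhile_le p ls) hlen'
          have hrpre : ∀ line ∈ ls.dropWhile p, PySem.Chars.startswith line ['>'] = true →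
              PySem.Chars.isIn pat line = true →
              PySem.Chars.split₀ (PySem.Chars.slice line (some 1) none) ≠ [] := by
            intro line hline
            exact hpre line (by
              have : line ∈ ls := (List.dropWhile_sublist p).mem hline
              simp [this])
          calc ((l :: ls).foldl (tfStepA pat) ([], ids, fasta)).2
              = (ls.foldl (tfStepA pat) (tok, ids ++ [tok], fasta ++ l ++ ['\n'])).2 := by
                simp only [List.foldl_cons, hstep]
            _ = ((ls.dropWhile p).foldl (tfStepA pat)
                  (tok, ids ++ [tok],
                   (fasta ++ l ++ ['\n']) ++ ((ls.takeWhile p).map (fun l => l ++ ['\n'])).flatten)).2 := by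
                conv_lhs => rw [hsplit]
                rw [foldA_body pat _ _ _ _ _ htok hbody]
            _ = ((ls.dropWhile p).foldl (tfStepA pat)
                  ([], ids ++ [tok],
                   (fasta ++ l ++ ['\n']) ++ ((ls.takeWhile p).map (fun l => l ++ ['\n'])).flatten)).2 :=
                foldA_sid_irrel pat _ _ _ _ hrest
            _ = (ids ++ (tfGo pat (l :: ls)).1,
                 fasta ++ (((tfGo pat (l :: ls)).2).map (fun l => l ++ ['\n'])).flatten) := by
                rw [ih (ls.dropWhile p) hrlen hrpre]
                rw [tfGo]
                simp [hhdr, hpat, htokdef, List.headD_eq_head?_getD, hp]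
        · -- header without the pattern: both skip the line
          have hstep : tfStepA pat ([], ids, fasta) l = ([], ids, fasta) := by
            simp [tfStepA, hhdr, hpat]
          have hpre' : ∀ line ∈ ls, PySem.Chars.startswith line ['>'] = true →
              PySem.Chars.isIn pat line = true →
              PySem.Chars.split₀ (PySem.Chars.slice line (some 1) none) ≠ [] := by
            intro line hline; exact hpre line (by simp [hline])
          simp only [List.foldl_cons, hstep]
          rw [ih ls hlen' hpre' ids fasta, tfGo]
          simp [hhdr, hpat]
      · -- non-header line outside any record: both drop it
        have hstep : tfStepA pat ([], ids, fasta) l = ([], ids, fasta) := by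
          simp [tfStepA, hhdr]
        have hpre' : ∀ line ∈ ls, PySem.Chars.startswith line ['>'] = true →
            PySem.Chars.isIn pat line = true →
            PySem.Chars.split₀ (PySem.Chars.slice line (some 1) none) ≠ [] := by
          intro line hline; exact hpre line (by simp [hline])
        simp only [List.foldl_cons, hstep]
        rw [ih ls hlen' hpre' ids fasta, tfGo]
        simp [hhdr]

-- "".join on pieces with nil separator is flatten
theorem join_nil_flatten (l : List (List Char)) : PySem.Chars.join [] l = l.flatten := by
  simp only [PySem.Chars.join, List.intercalate]
  induction l with
  | nil => simp
  | cons a t ih => cases t <;> simp_all [List.intersperse]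

-- ===== VERDICT (by name: the statement is the Claim_ definition above) =====
theorem tara_filter_spec : Claim_equal_tara_filter := by
  intro sequences pattern _ hpre
  unfold Spec_tara_filter tara_filter tara_filter_alt
  have h := foldA_eq_go pattern.toList (PySem.Chars.splitOn sequences.toList ['\n']).length
    (PySem.Chars.splitOn sequences.toList ['\n']) le_rfl hpre [] []
  simp only [h, join_nil_flatten]
  simp
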